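-- pv_equiv track=rewrite | github.com/sputnicyoji/csharp_Repomap_for_Agent | csharp_repomap/cli.py | _remove_repomap_section
-- ===== SOURCE A (Python) =====
-- def _remove_repomap_section(content: str) -> str:
--     """Remove RepoMap section from hook content"""
--     lines = content.split('\n')
--     result = []
--     skip = False
--
--     for line in lines:
--         if '# RepoMap' in line or '# repomap' in line:
--             skip = True
--             continue
--         if skip and (line.startswith('#') or not line.strip()):
--             continue
--         if skip and 'repomap' in line.lower():
--             continue
--         skip = False
--         result.append(line)
--
--     return '\n'.join(result)
-- ===== SOURCE B (Python) =====
-- def _remove_repomap_section(content: str) -> str: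
--     """Remove RepoMap section from hook content.
--
--     Stateless per-line rule: a line is kept unless it is a RepoMap header, or it
--     is a section-looking line ('#'-prefixed, blank, or mentioning repomap) that
--     is reachable backwards from a header through section-looking lines only."""
--     lines = content.split('\n')
--
--     def header(l):
--         return '# RepoMap' in l or '# repomap' in l
--
--     def sect(l):
--         return l.startswith('#') or not l.strip() or 'repomap' in l.lower()
--
--     def in_section(i):
--         for k in range(i - 1, -1, -1):
--             if header(lines[k]):
--                 return True
--             if not sect(lines[k]):
--                 return False
--         return False
--
--     return '\n'.join(l for i, l in enumerate(lines)
--                      if not header(l) and not (sect(l) and in_section(i)))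
-- ===== Notes on version B (the rewrite author's own statement) =====
-- stated objective: alternative
-- what changed: Replaces A's stateful single pass (a skip flag threaded through the loop) by a stateless per-line membership test: each line is judged independently via a backward lookback to the nearest header through section-looking lines, and the result is one filtering comprehension with no cross-iteration state.
import Mathlib
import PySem

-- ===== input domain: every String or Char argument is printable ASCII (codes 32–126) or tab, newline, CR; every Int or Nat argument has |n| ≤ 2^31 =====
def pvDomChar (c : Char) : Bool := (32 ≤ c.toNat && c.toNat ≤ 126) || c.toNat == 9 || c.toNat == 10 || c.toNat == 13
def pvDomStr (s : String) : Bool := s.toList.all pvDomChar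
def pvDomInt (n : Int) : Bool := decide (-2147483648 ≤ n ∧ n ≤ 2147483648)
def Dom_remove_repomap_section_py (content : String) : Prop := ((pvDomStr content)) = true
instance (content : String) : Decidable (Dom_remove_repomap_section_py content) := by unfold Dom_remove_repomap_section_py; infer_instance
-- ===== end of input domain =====

-- B replaces A's stateful single pass by a stateless per-line rule with a backward lookback
-- to the nearest header (objective: alternative decomposition; B is not faster).

-- ===== PORT A =====
def remove_repomap_section_py (content : String) : String :=
  let lines := (PySem.Str.split? content "\n").getD []
  let fin := lines.foldl (fun (acc : List String × Bool) line =>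
      if PySem.Str.isIn "# RepoMap" line || PySem.Str.isIn "# repomap" line then
        (acc.1, true)
      else if acc.2 && (PySem.Str.startswith line "#" || PySem.Str.strip line == "") then
        acc
      else if acc.2 && PySem.Str.isIn "repomap" (PySem.Str.lower line) then
        acc
      else
        (acc.1 ++ [line], false))
    ([], false)
  PySem.Str.join "\n" fin.1

-- ===== PORT B =====
-- Source B's header(l)
def pvHeader (l : String) : Bool :=
  PySem.Str.isIn "# RepoMap" l || PySem.Str.isIn "# repomap" l

-- Source B's sect(l)
def pvSect (l : String) : Bool :=
  (PySem.Str.startswith l "#" || PySem.Str.strip l == "") ||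
    PySem.Str.isIn "repomap" (PySem.Str.lower l)

-- Source B's in_section(i): the loop 'for k in range(i-1, -1, -1)' visits lines[i-1], …, lines[0],
-- i.e. walks (lines.take i).reverse front to back; ported as structural recursion on that list
-- (exact: 0 ≤ i ≤ len(lines) for every index enumerate produces).
def pvBack : List String → Bool
  | [] => false
  | l :: rest =>
    if pvHeader l then true
    else if pvSect l then pvBack rest
    else false

def pvInSection (lines : List String) (i : Int) : Bool :=
  pvBack ((lines.take i.toNat).reverse)

def remove_repomap_section_py_alt (content : String) : String :=
  let lines := (PySem.Str.split? content "\n").getD []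
  PySem.Str.join "\n"
    (((PySem.List.enumerate lines).filter (fun p =>
        !pvHeader p.2 && !(pvSect p.2 && pvInSection lines p.1))).map (·.2))

-- ===== PRECONDITION & SPEC =====
def Spec_remove_repomap_section_py (content : String) (out : String) : Prop := out = remove_repomap_section_py_alt content
instance (content : String) (out : String) : Decidable (Spec_remove_repomap_section_py content out) := by unfold Spec_remove_repomap_section_py; infer_instance

-- ===== CLAIM (what is proved, stated in full; the proofs are below) =====
def Claim_equal_remove_repomap_section_py : Prop := ∀ (content : String), Dom_remove_repomap_section_py content → Spec_remove_repomap_section_py content (remove_repomap_section_py content)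

-- ===== LEMMAS AND PROOFS =====

-- A's loop body, and a recursive characterisation of its fold
def pvStepA (acc : List String × Bool) (line : String) : List String × Bool :=
  if PySem.Str.isIn "# RepoMap" line || PySem.Str.isIn "# repomap" line then
    (acc.1, true)
  else if acc.2 && (PySem.Str.startswith line "#" || PySem.Str.strip line == "") then
    acc
  else if acc.2 && PySem.Str.isIn "repomap" (PySem.Str.lower line) then
    acc
  else
    (acc.1 ++ [line], false)

def pvLoopA : List String → Bool → List String
  | [], _ => []
  | l :: ls, skip =>
    if pvHeader l then
      pvLoopA ls true
    else if skip && (PySem.Str.startswith l "#" || PySem.Str.strip l == "") then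
      pvLoopA ls skip
    else if skip && PySem.Str.isIn "repomap" (PySem.Str.lower l) then
      pvLoopA ls skip
    else
      l :: pvLoopA ls false

theorem pvFoldA_eq (lines : List String) (res : List String) (skip : Bool) :
    (lines.foldl pvStepA (res, skip)).1 = res ++ pvLoopA lines skip := by
  induction lines generalizing res skip with
  | nil => simp [pvLoopA]
  | cons l ls ih =>
    simp only [List.foldl_cons, pvStepA, pvLoopA, pvHeader]
    split_ifs with h1 h2 h3 <;> simp [ih]

-- main invariant: A's skip flag at position |pre| equals B's backward lookback over pre
theorem pvMain (ls : List String) : ∀ (pre : List String),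
    pvLoopA ls (pvBack pre) =
      ((PySem.List.enumerate ls (pre.length : Int)).filter (fun p =>
          !pvHeader p.2 && !(pvSect p.2 && pvInSection (pre.reverse ++ ls) p.1))).map (·.2) := by
  induction ls with
  | nil => intro pre; simp [pvLoopA, PySem.List.enumerate_nil]
  | cons l ls ih =>
    intro pre
    rw [PySem.List.enumerate_cons, List.filter_cons]
    have hkeep : pvInSection (pre.reverse ++ l :: ls) (pre.length : Int) = pvBack pre := by
      unfold pvInSection
      rw [show ((pre.length : Int)).toNat = pre.length from rfl,
        show pre.reverse ++ l :: ls = pre.reverse ++ [l] ++ ls by simp,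
        List.take_append_of_le_length (by simp),
        show (pre.reverse ++ [l]).take pre.length = pre.reverse from
          List.take_left' (by simp), List.reverse_reverse]
    have hrest :
        ((PySem.List.enumerate ls ((pre.length : Int) + 1)).filter (fun p =>
            !pvHeader p.2 && !(pvSect p.2 && pvInSection (pre.reverse ++ l :: ls) p.1))).map (·.2) =
          pvLoopA ls (pvBack (l :: pre)) := by
      have h := ih (l :: pre)
      rw [show (l :: pre).reverse ++ ls = pre.reverse ++ l :: ls by simp] at h
      rw [h]; norm_num
    rw [hkeep]
    show pvLoopA (l :: ls) (pvBack pre) = _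
    by_cases h1 : pvHeader l = true
    · -- header line: dropped by both; B's lookback on (l :: pre) is true
      rw [if_neg (by simp [h1]), hrest,
        show pvBack (l :: pre) = true by simp [pvBack, h1]]
      simp only [pvLoopA]
      rw [if_pos h1]
    · have h1' : pvHeader l = false := Bool.eq_false_iff.mpr h1
      by_cases hsb : pvBack pre = true
      · by_cases hscb : pvSect l = true
        · -- skip active and section-looking: dropped by both
          rw [if_neg (by simp [h1', hscb, hsb]), hrest,
            show pvBack (l :: pre) = true by simp [pvBack, h1', hscb, hsb]]
          simp only [pvLoopA]
          rw [if_neg (by simp [h1']), hsb]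
          by_cases h2 : (PySem.Str.startswith l "#" || PySem.Str.strip l == "") = true
          · rw [if_pos (by rw [h2]; decide)]
          · have h2' : (PySem.Str.startswith l "#" || PySem.Str.strip l == "") = false :=
              Bool.eq_false_iff.mpr h2
            have h3 : PySem.Str.isIn "repomap" (PySem.Str.lower l) = true := by
              unfold pvSect at hscb
              rcases Bool.or_eq_true_iff.mp hscb with h | h
              · exact absurd h h2
              · exact h
            rw [if_neg (by rw [h2']; decide), if_pos (by rw [h3]; decide)]
        · -- skip active but plain line: kept by both, skip resets
          have hsc' : pvSect l = false := Bool.eq_false_iff.mpr hscb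
          obtain ⟨h2, h3⟩ := Bool.or_eq_false_iff.mp (by unfold pvSect at hsc'; exact hsc')
          rw [if_pos (by simp [h1', hsc']), List.map_cons, hrest,
            show pvBack (l :: pre) = false by simp [pvBack, h1', hsc']]
          simp only [pvLoopA]
          rw [if_neg (by simp [h1']), hsb, if_neg (by rw [h2]; decide), if_neg (by rw [h3]; decide)]
      · -- skip inactive: kept by both, skip stays false
        have hs' : pvBack pre = false := Bool.eq_false_iff.mpr hsb
        rw [if_pos (by simp [h1', hs']), List.map_cons, hrest,
          show pvBack (l :: pre) = false by simp [pvBack, h1', hs']]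
        simp only [pvLoopA]
        rw [if_neg (by simp [h1']), hs', if_neg (by simp), if_neg (by simp)]

-- ===== VERDICT (by name: the statement is the Claim_ definition above) =====
theorem remove_repomap_section_py_spec : Claim_equal_remove_repomap_section_py := by
  intro content _
  unfold Spec_remove_repomap_section_py remove_repomap_section_py remove_repomap_section_py_alt
  show PySem.Str.join "\n"
      ((List.foldl pvStepA ([], false) ((PySem.Str.split? content "\n").getD [])).1) = _
  rw [pvFoldA_eq, List.nil_append]
  have := pvMain ((PySem.Str.split? content "\n").getD []) []
  simp only [List.length_nil, Nat.cast_zero, List.reverse_nil, List.nil_append] at this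
  rw [show pvBack [] = false from rfl] at this
  rw [this]
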